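-- pv_equiv track=rewrite | github.com/mikechen66/Data_Structures_Algorithms_in_Python | chapter04/sample_calls/unique.py | unique3
-- ===== SOURCE A (Python) =====
-- def unique3(S, start=0, stop=9):
--     # Return True if there are no duplicate elements in slice S[start:stop].
--     if stop - start <= 1:
--         return True                      # at most one item
--     elif not unique3(S, start, stop-1):
--         return False                     # first part has duplicate
--     elif not unique3(S, start+1, stop):
--         return False                     # second part has duplicate
--     else:
--         return S[start] != S[stop-1]     # do first and last differ?
-- ===== SOURCE B (Python) =====
-- def unique3(S, start=0, stop=9):
--     # Iterative pairwise check: any duplicate among S[start], ..., S[stop-1]?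
--     for j in range(start, stop):
--         for i in range(start, j):
--             if S[i] == S[j]:
--                 return False
--     return True
-- ===== Notes on version B (the rewrite author's own statement) =====
-- stated objective: simpler
-- what changed: Replaced A's divide-overlap recursion with a plain iterative double loop over index pairs (i<j), comparing elements directly.
-- outside the precondition, e.g. on unique3([1, 1], 0, 9): A returns False, B returns False
import Mathlib
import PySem

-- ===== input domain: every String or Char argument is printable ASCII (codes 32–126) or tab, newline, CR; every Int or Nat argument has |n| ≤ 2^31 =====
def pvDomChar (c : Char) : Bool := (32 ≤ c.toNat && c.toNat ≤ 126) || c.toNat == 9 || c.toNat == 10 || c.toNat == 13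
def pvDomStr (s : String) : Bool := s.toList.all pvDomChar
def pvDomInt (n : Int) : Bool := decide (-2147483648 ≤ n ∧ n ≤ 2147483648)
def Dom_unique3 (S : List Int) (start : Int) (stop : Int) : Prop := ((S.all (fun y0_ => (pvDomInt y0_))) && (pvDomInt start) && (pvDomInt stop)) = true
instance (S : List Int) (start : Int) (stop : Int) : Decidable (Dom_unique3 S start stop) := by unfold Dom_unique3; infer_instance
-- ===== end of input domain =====

-- B replaces A's divide-overlap recursion by one iterative double loop over index
-- pairs (i < j); objective: simpler.

-- ===== PORT A =====
-- S[i] is ported as pyGetD … 0; Pre_unique3 excludes the inputs where Python's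
-- S[start] / S[stop-1] would raise IndexError, so the default is never observed.
def unique3 (S : List Int) (start : Int) (stop : Int) : Bool :=
  if stop - start ≤ 1 then
    true
  else if !(unique3 S start (stop - 1)) then
    false
  else if !(unique3 S (start + 1) stop) then
    false
  else
    PySem.List.pyGetD S start 0 != PySem.List.pyGetD S (stop - 1) 0
termination_by (stop - start).toNat
decreasing_by all_goals omega

-- ===== PORT B =====
-- 'for j in range(start, stop): for i in range(start, j): if S[i]==S[j]: return False'
-- is ported as short-circuiting List.all over the same ranges.
def unique3_alt (S : List Int) (start : Int) (stop : Int) : Bool :=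
  (PySem.List.pyRange start stop 1).all (fun j =>
    (PySem.List.pyRange start j 1).all (fun i =>
      PySem.List.pyGetD S i 0 != PySem.List.pyGetD S j 0))

-- ===== PRECONDITION & SPEC =====
-- Pre_ excludes exactly the windows that reach an out-of-range index in Python:
-- there A raises IndexError unless a duplicate is found first (then A returns False,
-- as does B; such inputs are excluded because A's raise-vs-return outcome depends on
-- where the duplicate lies, not on the function's purpose).
def Pre_unique3 (S : List Int) (start : Int) (stop : Int) : Prop :=
  stop - start ≤ 1 ∨ (-(S.length : Int) ≤ start ∧ stop ≤ (S.length : Int))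
instance (S : List Int) (start : Int) (stop : Int) : Decidable (Pre_unique3 S start stop) := by
  unfold Pre_unique3; infer_instance

def pvWitness_unique3 : List Int × Int × Int := ([1, 2, 3, 2], 0, 3)

def Spec_unique3 (S : List Int) (start : Int) (stop : Int) (out : Bool) : Prop := out = unique3_alt S start stop
instance (S : List Int) (start : Int) (stop : Int) (out : Bool) : Decidable (Spec_unique3 S start stop out) := by unfold Spec_unique3; infer_instance

-- ===== CLAIM (what is proved, stated in full; the proofs are below) =====
def Claim_equal_unique3 : Prop := ∀ (S : List Int) (start : Int) (stop : Int), Dom_unique3 S start stop → Pre_unique3 S start stop → Spec_unique3 S start stop (unique3 S start stop)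

-- ===== LEMMAS AND PROOFS =====

-- "No duplicate pair of indices start ≤ i < j < stop" for the total (default-valued) getter.
def PairwiseNe (S : List Int) (start : Int) (stop : Int) : Prop :=
  ∀ i j : Int, start ≤ i → i < j → j < stop →
    PySem.List.pyGetD S i 0 ≠ PySem.List.pyGetD S j 0

theorem unique3_alt_iff (S : List Int) (start stop : Int) :
    unique3_alt S start stop = true ↔ PairwiseNe S start stop := by
  unfold unique3_alt PairwiseNe
  simp only [List.all_eq_true, PySem.List.mem_pyRange_one, bne_iff_ne, ne_eq]
  constructor
  · intro h i j h1 h2 h3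
    exact h j ⟨by omega, h3⟩ i ⟨h1, h2⟩
  · intro h j hj i hi
    exact h i j hi.1 hi.2 hj.2

theorem unique3_iff (S : List Int) :
    ∀ (n : Nat) (start stop : Int), (stop - start).toNat ≤ n →
      (unique3 S start stop = true ↔ PairwiseNe S start stop) := by
  intro n
  induction n with
  | zero =>
    intro start stop h
    rw [unique3]
    have hle : stop - start ≤ 1 := by omega
    simp only [if_pos hle, true_iff]
    intro i j h1 h2 h3; omega
  | succ n ih =>
    intro start stop h
    rw [unique3]
    by_cases hle : stop - start ≤ 1
    · simp only [if_pos hle, true_iff]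
      intro i j h1 h2 h3; omega
    · have h1 := ih start (stop - 1) (by omega)
      have h2 := ih (start + 1) stop (by omega)
      simp only [if_neg hle, Bool.not_eq_true']
      cases hv1 : unique3 S start (stop - 1) with
      | false =>
        simp only [reduceIte, Bool.false_eq_true, false_iff]
        intro hP
        exact absurd (h1.mpr (fun i j a b c => hP i j a b (by omega))) (by simp [hv1])
      | true =>
        cases hv2 : unique3 S (start + 1) stop with
        | false =>
          simp only [Bool.true_eq_false, reduceIte, Bool.false_eq_true, false_iff]
          intro hP
          exact absurd (h2.mpr (fun i j a b c => hP i j (by omega) b c)) (by simp [hv2])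
        | true =>
          simp only [Bool.true_eq_false, reduceIte, bne_iff_ne, ne_eq]
          have hP1 := h1.mp hv1
          have hP2 := h2.mp hv2
          constructor
          · intro hlast i j hi hij hj
            rcases lt_or_ge j (stop - 1) with hj' | hj'
            · exact hP1 i j hi hij hj'
            · rcases lt_or_ge start i with hi' | hi'
              · exact hP2 i j (by omega) hij hj
              · have : i = start := by omega
                have : j = stop - 1 := by omega
                subst_vars
                exact hlast
          · intro hP
            exact hP start (stop - 1) (by omega) (by omega) (by omega)

-- ===== VERDICT (by name: the statement is the Claim_ definition above) =====
theorem unique3_spec : Claim_equal_unique3 := by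
  intro S start stop _ _
  unfold Spec_unique3
  have h1 := unique3_iff S (stop - start).toNat start stop (le_refl _)
  have h2 := unique3_alt_iff S start stop
  by_cases h : PairwiseNe S start stop
  · rw [h1.mpr h, h2.mpr h]
  · have e1 : unique3 S start stop = false := by
      cases hv : unique3 S start stop
      · rfl
      · exact absurd (h1.mp hv) h
    have e2 : unique3_alt S start stop = false := by
      cases hv : unique3_alt S start stop
      · rfl
      · exact absurd (h2.mp hv) h
    rw [e1, e2]
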